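/- GENERATED by tools/from_farm_form.py from prooffarm-gif/accepted/DGifOpen.3/Lemmas.lean (a worked proof of the farm's unit `DGifOpen.3`,
   accepted by the verdict) — do not edit. -/
import Gif.Spec.Units.DGifOpen_3
import Gif.Spec.AllSegs

/-!
  Lemmas for the unit `DGifOpen.3` (segment 3 of `DGifOpen`, dgif_lib.c:206-214): `InternalRead(gif, Buf, 6)`; a short read stores
  `*Error`, frees pv and gif, and goes to the epilogue with NULL. The segment has three calls and a checked store: it is walked in
  FOUR STEPS that meet at private cuts (a call's return address, the join of the two arms of `if (Error != NULL)`).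

      o3_env_at_call   `Env` at a callee's entry (the form of `Env.at_call` for a function without `Env` at its own entry)
      o3_err_range     where `*Error` is: at or above the entry's clean stack end, in the stack region, off the cursor
      o3_store_err     the store `*Error = code` keeps `HeapInv`, `GifOK`, `rem`
      o3_opened_move   `Opened` at another address of the same memory
      o3_after_free    the cursor, the constants, `rem` through `free`'s footprint
      o3_at_108882     the private cut 108882H;   o3_AtRet22   the private assertion at 10888AH (ret22)
      o3_seg_call      10879EH … `InternalRead(gif, Buf, 6)` … 1087B0H (ret13):    `Opened` → `Opened` at ret13
      o3_seg_branch    1087B0H … 1087B9H (six bytes) | 108882H (short; `*Error = 102` if not NULL)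
      o3_seg_free1     108882H … `free(pv)` … 10888AH (ret22):                       `Opened` → `o3_AtRet22`
      o3_seg_free2     10888AH … `free(gif)` … `ebx = 0` … 108816H:                  `o3_AtRet22` → `Exit`
-/

open X86 X86.User Asan ProgX.Base ProgX.Base.Spec Gif.Spec

set_option maxRecDepth 4000
set_option maxHeartbeats 4000000

namespace Gif.Spec.DGifOpen_3

/-- **`Env` at the entry of a callee of `DGifOpen`'s body** (the form of `Env.at_call` for a function that has NO `Env` at its
entry: the entry's heap `H` is not the present heap `Hc`, only at the same place). -/
theorem o3_env_at_call {H Hc : Heap} {rest : List Obj} {frames : List (Nat × FrameLayout)} {F : Forest} {R : Rd} {e s : State}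
    {base top lo : Nat} {Fl : FrameLayout} {mem : Mem} (hpre : HeapPre H rest frames e) (hctx : Ctx rest frames R)
    (hreg : SameRegion H Hc)
    (hinv : HeapInv Hc rest ((base, Fl) :: frames) top mem) (hok : GifOK Hc F R mem)
    (hs : Mem.SameExcept [⟨lo, top⟩] mem s.mem) (hlo : 0x700000 ≤ lo) (htop : top ≤ (e.reg .rsp).toNat + 8)
    (hsp : (s.reg .rsp).toNat + 8 ≤ top) (h8 : (s.reg .rsp).toNat % 8 = 0) (hlo' : 0x700000 ≤ (s.reg .rsp).toNat + 8) :
    Env Hc rest ((base, Fl) :: frames) F R s := by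
  have hcur := hctx.cursor_range hpre.inv.shadow
  have hhi := hinv.shadow.stack.hi
  have hoff := hinv.heap.offStack
  have hroom := hinv.heap.room
  have hun : ShadowUntouched mem s.mem := by
    apply hs.eqOn
    intro w hw
    have e := List.mem_singleton.mp hw
    rw [e]
    simp only
    omega
  have hinv' : HeapInv Hc rest ((base, Fl) :: frames) ((s.reg .rsp).toNat + 8) s.mem := by
    refine (hinv.sameExcept hun hs ?_).lower hsp (by omega) hlo'
    intro w hw
    have e := List.mem_singleton.mp hw
    rw [e]
    left
    simp only
    omega
  refine ⟨⟨hinv', hreg.1.trans hpre.base, hreg.2.trans hpre.limit, hpre.text, hpre.offText⟩, hctx.push base Fl, ?_⟩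
  apply hok.sameExcept hinv.heap ⟨hcur.1, hcur.2.1⟩ hs
  intro w hw
  have e := List.mem_singleton.mp hw
  rw [e]
  apply Loose.stack hinv.heap
  · simp only
    omega
  · simp only
    omega
  · simp only
    omega

/-- **10879EH … the call of InternalRead … 1087B0H (ret13)** (dgif_lib.c:206 `InternalRead(GifFile, Buf, 6)`). -/
theorem o3_seg_call (Lay : Layout) (hLay : Lay.hi = 0x1000000) (μ : Microarch) (hμ : UserX.MicroOK μ) (u₀ : State)
    (hcode : HasCodeNat Lay u₀ Gif.L.DGifOpen.entry Gif.Code.code_DGifOpen.nat Gif.L.DGifOpen.size)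
    (H : Heap) (rest : List Obj) (frames : List (Nat × FrameLayout)) (R : Rd) (Hc : Heap) (gif pv : Nat) (e : State) (ret : Word)
    (h_InternalRead : Calls Lay μ ProgX.Base.WayInv (ProgX.Base.conv u₀) Gif.L.InternalRead.entry
      (Gif.Spec.InternalRead.spec Hc rest (DGifOpen.framesIn frames e) (DGifOpen.fresh gif pv) R 6))
    (v : State) (hat : DGifOpen.Opened Gif.L.DGifOpen.at_10879e H rest frames R Hc gif pv u₀ e ret v) :
    ReachVia Lay μ ProgX.Base.WayInv v (DGifOpen.Opened Gif.L.DGifOpen.ret13 H rest frames R Hc gif pv u₀ e ret) := by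
  obtain ⟨hcore, c_r13, hrbx, hrbp, hregion, hinv, hok⟩ := hat
  have he := hcore.entry
  v_entry he
  obtain ⟨hpre, hctx, hcursor, hconsts, hrdi, hrsi, herr⟩ := hcore.pre
  have w_rip := hcore.rip
  have c_rsp : v.reg .rsp = e.reg .rsp - 120 := hcore.rsp
  have w_kept : RegsKept [.rsp] v v := RegsKept.refl _ _
  have w_eq : Mem.EqOn ProgX.Base.L.textLo ProgX.Base.L.textHi u₀.mem v.mem := ProgX.Base.conv_code_eqOn hcore.code
  have hdf := (show abiInv _ from hcore.abi).1
  have hmx := (show abiInv _ from hcore.abi).2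
  have hsse := ProgX.Base.sseOK_of_abiInv hcore.abi
  have k_r15 : v.mem.readLE (e.reg .rsp - 8) 8 = (e.reg .r15).toNat := hcore.slot_r15
  have k_r14 : v.mem.readLE (e.reg .rsp - 16) 8 = (e.reg .r14).toNat := hcore.slot_r14
  have k_r13 : v.mem.readLE (e.reg .rsp - 24) 8 = (e.reg .r13).toNat := hcore.slot_r13
  have k_r12 : v.mem.readLE (e.reg .rsp - 32) 8 = (e.reg .r12).toNat := hcore.slot_r12
  have k_rbp : v.mem.readLE (e.reg .rsp - 40) 8 = (e.reg .rbp).toNat := hcore.slot_rbp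
  have k_rbx : v.mem.readLE (e.reg .rsp - 48) 8 = (e.reg .rbx).toNat := hcore.slot_rbx
  have k_ra : UInt64.ofNat (v.mem.readLE (e.reg .rsp) 8) = ret := hcore.slot_ra
  have hsame : Mem.SameExcept
    [⟨(e.reg .rsp).toNat - 528, (e.reg .rsp).toNat⟩,
     shadowSpan ((e.reg .rsp).toNat - 120) ((e.reg .rsp).toNat - 56),
     ⟨0x800000, 0x1000020⟩,
     ⟨(e.reg .rdx).toNat, (e.reg .rdx).toNat + 4⟩,
     ⟨R.cur, R.cur + 8⟩] e.mem v.mem := hcore.same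
  have hcur := hctx.cursor_range hpre.inv.shadow
  u_walk hcode [hμ.vendor] until [Gif.L.DGifOpen.ret13] span [ProgX.Base.L.textLo, ProgX.Base.L.textHi] side (v_side)
  case call_inv =>
    v_inv
  case pre_1087ab =>
    -- INTERNALREAD'S PRECONDITION. The environment for the frame list with the own frame in front: only the return address was
    -- pushed since `v`
    have hs : Mem.SameExcept [⟨(e.reg .rsp).toNat - 528, (e.reg .rsp).toNat - 120⟩] v.mem s_1087ab.mem := by
      rw [w_mem]
      u_same
    have henv' : Env Hc rest (DGifOpen.framesIn frames e) (DGifOpen.fresh gif pv) R s_1087ab := by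
      refine o3_env_at_call hpre hctx hregion hinv hok hs (by omega) (by omega) ?_ ?_ ?_
      · rw [w_rsp]
        u_omega
      · rw [w_rsp]
        u_omega
      · rw [w_rsp]
        u_omega
    -- the buffer is the frame's object `Buf` (`[rsp + 0x20]` = base + 32, 7 bytes), named by its numbers
    have ho : (⟨(e.reg .rsp).toNat - 120 + 32, 7, .stack⟩ : Obj) ∈
        Gif.Frames.DGifOpen.objsAt ((e.reg .rsp).toNat - 120) := List.mem_cons_self
    have hsz : Gif.Frames.DGifOpen.size = 64 := rfl
    have hb : (e.reg .rsp).toNat - 120 + Gif.Frames.DGifOpen.size ≤ (e.reg .rsp).toNat + 8 := by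
      rw [hsz]
      omega
    have hbuf : BufOK Hc rest (DGifOpen.framesIn frames e) (DGifOpen.fresh gif pv) R (s_1087ab.reg .rsi).toNat 6 := by
      apply BufOK.own hpre hctx hinv hb ho
      · rw [w_rsi]
        u_omega
      · rw [w_rsi]
        u_omega
    -- the clauses: `Env`, `rdi = gif`, `edx = 6`, `1 ≤ 6`, `6 < 2 ^ 31`, `BufOK`
    refine ⟨henv', ?_, ?_, by decide, by decide, hbuf⟩
    · rw [w_rdi]
      exact hrbx
    · rw [w_rdx]
      decide
  -- 0x1087b0 (ret13): INTERNALREAD HAS RETURNED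
  obtain ⟨k, hk1, hk2, hk3, hk4, hk5, hback⟩ :
    ReadPost Hc rest (DGifOpen.framesIn frames e) (DGifOpen.fresh gif pv) R 6 s_1087ab s_1087abr := w_post
  -- the reader at InternalRead's entry is where it was at `v`: only the return address was pushed
  have hs0 : Mem.SameExcept [⟨(e.reg .rsp).toNat - 528, (e.reg .rsp).toNat - 120⟩] v.mem s_1087ab.mem := by
    rw [w_mem_1087ab]
    u_same
  have hrem0 : rem R s_1087ab.mem = rem R v.mem := by
    apply rem_sameExcept hs0 (by omega)
    intro w hw
    have e := List.mem_singleton.mp hw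
    rw [e]
    simp only
    omega
  have e_top : (s_1087ab.reg .rsp).toNat + 8 = (e.reg .rsp).toNat - 120 := by
    rw [w_rsp_1087ab]
    u_omega
  -- the callee's footprint in terms of `v`
  v_after_call w_rsp_1087ab w_mem_1087ab
  simp only [w_rsi_1087ab] at w_same
  -- THE SLOTS AND THE RETURN ADDRESS, over the pushed return address (first step) and through InternalRead's footprint (second)
  have hp_r15 : s_1087ab.mem.readLE (e.reg .rsp - 8) 8 = (e.reg .r15).toNat := by
    rw [w_mem_1087ab]
    u_frame k_r15
  rw [w_mem_1087ab] at hp_r15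
  have hs_r15 : s_1087abr.mem.readLE (e.reg .rsp - 8) 8 = (e.reg .r15).toNat := by u_frame hp_r15
  have hp_r14 : s_1087ab.mem.readLE (e.reg .rsp - 16) 8 = (e.reg .r14).toNat := by
    rw [w_mem_1087ab]
    u_frame k_r14
  rw [w_mem_1087ab] at hp_r14
  have hs_r14 : s_1087abr.mem.readLE (e.reg .rsp - 16) 8 = (e.reg .r14).toNat := by u_frame hp_r14
  have hp_r13 : s_1087ab.mem.readLE (e.reg .rsp - 24) 8 = (e.reg .r13).toNat := by
    rw [w_mem_1087ab]
    u_frame k_r13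
  rw [w_mem_1087ab] at hp_r13
  have hs_r13 : s_1087abr.mem.readLE (e.reg .rsp - 24) 8 = (e.reg .r13).toNat := by u_frame hp_r13
  have hp_r12 : s_1087ab.mem.readLE (e.reg .rsp - 32) 8 = (e.reg .r12).toNat := by
    rw [w_mem_1087ab]
    u_frame k_r12
  rw [w_mem_1087ab] at hp_r12
  have hs_r12 : s_1087abr.mem.readLE (e.reg .rsp - 32) 8 = (e.reg .r12).toNat := by u_frame hp_r12
  have hp_rbp : s_1087ab.mem.readLE (e.reg .rsp - 40) 8 = (e.reg .rbp).toNat := by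
    rw [w_mem_1087ab]
    u_frame k_rbp
  rw [w_mem_1087ab] at hp_rbp
  have hs_rbp : s_1087abr.mem.readLE (e.reg .rsp - 40) 8 = (e.reg .rbp).toNat := by u_frame hp_rbp
  have hp_rbx : s_1087ab.mem.readLE (e.reg .rsp - 48) 8 = (e.reg .rbx).toNat := by
    rw [w_mem_1087ab]
    u_frame k_rbx
  rw [w_mem_1087ab] at hp_rbx
  have hs_rbx : s_1087abr.mem.readLE (e.reg .rsp - 48) 8 = (e.reg .rbx).toNat := by u_frame hp_rbx
  have hp_ra : UInt64.ofNat (s_1087ab.mem.readLE (e.reg .rsp) 8) = ret := by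
    rw [w_mem_1087ab]
    u_frame k_ra
  rw [w_mem_1087ab] at hp_ra
  have hs_ra : UInt64.ofNat (s_1087abr.mem.readLE (e.reg .rsp) 8) = ret := by u_frame hp_ra
  -- the footprint since the entry: InternalRead's windows lie inside the function's
  have hsame1 : Mem.SameExcept
    [⟨(e.reg .rsp).toNat - 528, (e.reg .rsp).toNat⟩,
     shadowSpan ((e.reg .rsp).toNat - 120) ((e.reg .rsp).toNat - 56),
     ⟨0x800000, 0x1000020⟩,
     ⟨(e.reg .rdx).toNat, (e.reg .rdx).toNat + 4⟩,
     ⟨R.cur, R.cur + 8⟩] e.mem s_1087abr.mem := by u_same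
  -- the heap's invariant comes back with the clean stack at the callee's `rsp + 8` = the body's `rsp`
  have hinv1 : HeapInv Hc rest (DGifOpen.framesIn frames e) ((e.reg .rsp).toNat - 120) s_1087abr.mem := by
    rw [← e_top]
    exact hback.inv
  -- THE EXIT ASSERTION: `Opened` at ret13
  refine ReachVia.done ?_
  exact {
    core := {
      entry := hcore.entry
      pre := hcore.pre
      rip := w_rip
      rsp := w_rsp
      r12 := (w_kept.get .r12 rfl).trans hcore.r12
      slot_r15 := hs_r15
      slot_r14 := hs_r14
      slot_r13 := hs_r13
      slot_r12 := hs_r12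
      slot_rbp := hs_rbp
      slot_rbx := hs_rbx
      slot_ra := hs_ra
      rem := by
        have h1 := hback.rem
        have h2 := hcore.rem
        omega
      same := hsame1
      code := w_code
      abi := w_inv
    }
    r13 := (w_kept.get .r13 rfl).trans c_r13
    rbx := by
      rw [w_kept.get .rbx rfl]
      exact hrbx
    rbp := by
      rw [w_kept.get .rbp rfl]
      exact hrbp
    region := hregion
    inv := hinv1
    ok := hback.ok
  }

/-- **Where `*Error` is, if it is not NULL**: in the stack region, off the cursor, and AT OR ABOVE THE CLEAN STACK'S END of the
function's entry (`top = RA + 8`: it lies in a stack object of a caller's frame): no store into the function's own stack and no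
saved-register slot meets it. -/
theorem o3_err_range {H : Heap} {rest : List Obj} {frames : List (Nat × FrameLayout)} {R : Rd} {p top : Nat} {mem : Mem}
    (h : ErrPtr H rest frames R p) (hp : p ≠ 0) (hinv : HeapInv H rest frames top mem) :
    top ≤ p ∧ 0x700000 ≤ p ∧ p + 4 ≤ 0x800000 ∧ (p + 4 ≤ R.cur ∨ R.cur + 16 ≤ p) := by
  rcases h with h0 | ⟨hl, hlo, hhi, hoffc⟩
  · exact absurd h0 hp
  · refine ⟨?_, hlo, hhi, hoffc⟩
    obtain ⟨o, ho, k1, k2⟩ := hl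
    rcases List.mem_append.mp ho with hs | hoth
    · obtain ⟨bF, hbF, g1, g2⟩ := ShadowInv.stackObj_gran hinv.shadow.stack hs
      obtain ⟨hF, a8, atop, ahi, _⟩ := hinv.shadow.stack.active bF hbF
      have hlo' := hinv.shadow.stack.lo
      have hs8 := hF.1
      unfold Obj.gLo at g1
      unfold Obj.gHi at g2
      omega
    · exfalso
      rcases List.mem_append.mp hoth with hheap | hr
      · obtain ⟨⟨c, hlive⟩, _⟩ := Heap.live_of_mem_liveObjs hheap
        have h1 := hinv.heap.obj_range hlive
        have h2 := hinv.heap.offStack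
        have h3 := hinv.heap.room
        have h4 := hinv.heap.size_le_cap hlive
        simp only at h1 h4
        omega
      · have hoff := hinv.shadow.off o (List.mem_append_right _ hr)
        unfold OffStack at hoff
        omega

/-- The address 108882H (`mov rdi, rbp`, dgif_lib.c:211, the first `free` of the short-read exit): where both arms of the test
of `Error` meet. It is not a cut of the design: the unit makes it one of its own. -/
abbrev o3_at_108882 : Word := 0x108882

/-- **The store `*Error = code`** (4 bytes of a stack object of a caller's frame, off the cursor: `ErrPtr`) keeps the heap's
invariant, the state invariant and the reader's measure, whatever the present heap is. -/
theorem o3_store_err {H Hc : Heap} {rest : List Obj} {frames frames' : List (Nat × FrameLayout)} {F : Forest} {R : Rd}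
    {top p : Nat} {mem : Mem} (herr : ErrPtr H rest frames R p) (hp : p ≠ 0)
    (hinv : HeapInv Hc rest frames' top mem) (hok : GifOK Hc F R mem)
    (hcur : 0x700000 ≤ R.cur ∧ R.cur + 16 ≤ 0x800000) (hbase : Hc.base = 0x800000) (a : Word) (val : Nat)
    (ha : a.toNat = p) :
    HeapInv Hc rest frames' top (mem.writeLE a 4 val) ∧ GifOK Hc F R (mem.writeLE a 4 val) ∧
      rem R (mem.writeLE a 4 val) = rem R mem := by
  obtain ⟨hloose, _⟩ := herr.loose hp hinv.heap F
  have hrange : 0x700000 ≤ p ∧ p + 4 ≤ 0x800000 ∧ (p + 4 ≤ R.cur ∨ R.cur + 16 ≤ p) := by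
    rcases herr with h0 | ⟨_, h1, h2, h3⟩
    · exact absurd h0 hp
    · exact ⟨h1, h2, h3⟩
  have hs : Mem.SameExcept [⟨a.toNat, a.toNat + 4⟩] mem (mem.writeLE a 4 val) :=
    Mem.SameExcept.writeLE _ mem a 4 val (by omega) ⟨_, List.mem_cons_self, Nat.le_refl _, Nat.le_refl _⟩
  refine ⟨hinv.writeLE_out a 4 val (by omega) (by omega) (by omega), ?_, ?_⟩
  · apply hok.sameExcept hinv.heap hcur hs
    intro w hw'
    have e := List.mem_singleton.mp hw'
    rw [e, ha]
    exact hloose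
  · apply rem_sameExcept hs (by omega)
    intro w hw'
    have e := List.mem_singleton.mp hw'
    rw [e]
    simp only
    omega

/-- **`Opened` at another address of the same memory**: a step that wrote no memory and none of `rsp r12 r13 rbx rbp` (a compare,
a jump) carries the whole assertion. -/
theorem o3_opened_move {cut cut' : Word} {H : Heap} {rest : List Obj} {frames : List (Nat × FrameLayout)} {R : Rd} {Hc : Heap}
    {gif pv : Nat} {u₀ e : State} {ret : Word} {v s : State}
    (hat : DGifOpen.Opened cut H rest frames R Hc gif pv u₀ e ret v)
    (hrip : s.rip = cut') (hmem : s.mem = v.mem) (hrsp : s.reg .rsp = e.reg .rsp - 120)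
    (h12 : s.reg .r12 = v.reg .r12) (h13 : s.reg .r13 = v.reg .r13) (hbx : s.reg .rbx = v.reg .rbx)
    (hbp : s.reg .rbp = v.reg .rbp) (habi : (conv u₀).inv s) :
    DGifOpen.Opened cut' H rest frames R Hc gif pv u₀ e ret s := by
  obtain ⟨hcore, c_r13, hrbx, hrbp, hregion, hinv, hok⟩ := hat
  exact {
    core := {
      entry := hcore.entry
      pre := hcore.pre
      rip := hrip
      rsp := hrsp
      r12 := h12.trans hcore.r12
      slot_r15 := by
        rw [hmem]
        exact hcore.slot_r15
      slot_r14 := by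
        rw [hmem]
        exact hcore.slot_r14
      slot_r13 := by
        rw [hmem]
        exact hcore.slot_r13
      slot_r12 := by
        rw [hmem]
        exact hcore.slot_r12
      slot_rbp := by
        rw [hmem]
        exact hcore.slot_rbp
      slot_rbx := by
        rw [hmem]
        exact hcore.slot_rbx
      slot_ra := by
        rw [hmem]
        exact hcore.slot_ra
      rem := by
        rw [hmem]
        exact hcore.rem
      same := by
        rw [hmem]
        exact hcore.same
      code := by
        rw [hmem]
        exact hcore.code
      abi := habi
    }
    r13 := h13.trans c_r13
    rbx := by
      rw [hbx]
      exact hrbx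
    rbp := by
      rw [hbp]
      exact hrbp
    region := hregion
    inv := by
      rw [hmem]
      exact hinv
    ok := by
      rw [hmem]
      exact hok
  }

/-- **1087B0H (ret13) … 1087B9H | 108882H** (dgif_lib.c:206-209). -/
theorem o3_seg_branch (Lay : Layout) (hLay : Lay.hi = 0x1000000) (μ : Microarch) (hμ : UserX.MicroOK μ) (u₀ : State)
    (hcode : HasCodeNat Lay u₀ Gif.L.DGifOpen.entry Gif.Code.code_DGifOpen.nat Gif.L.DGifOpen.size)
    (H : Heap) (rest : List Obj) (frames : List (Nat × FrameLayout)) (R : Rd) (Hc : Heap) (gif pv : Nat) (e : State) (ret : Word)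
    (h_asan_store4_noabort : Asan.SmallCheck Lay μ ProgX.Base.WayInv (ProgX.Base.CodeOK u₀) [.rax, .rcx, .rdx] 4
      ProgX.Base.L.__asan_store4_noabort.entry)
    (v : State) (hat : DGifOpen.Opened Gif.L.DGifOpen.ret13 H rest frames R Hc gif pv u₀ e ret v) :
    ReachVia Lay μ ProgX.Base.WayInv v (fun w =>
      DGifOpen.Opened Gif.L.DGifOpen.at_1087b9 H rest frames R Hc gif pv u₀ e ret w ∨
      DGifOpen.Opened o3_at_108882 H rest frames R Hc gif pv u₀ e ret w) := by
  have hat0 := hat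
  obtain ⟨hcore, c_r13, hrbx, hrbp, hregion, hinv, hok⟩ := hat
  have he := hcore.entry
  v_entry he
  obtain ⟨hpre, hctx, hcursor, hconsts, hrdi, hrsi, herr⟩ := hcore.pre
  have w_rip := hcore.rip
  have c_rsp : v.reg .rsp = e.reg .rsp - 120 := hcore.rsp
  obtain ⟨z, c_rax⟩ : ∃ z, v.reg .rax = z := ⟨_, rfl⟩
  have w_kept : RegsKept [.rsp] v v := RegsKept.refl _ _
  have w_eq : Mem.EqOn ProgX.Base.L.textLo ProgX.Base.L.textHi u₀.mem v.mem := ProgX.Base.conv_code_eqOn hcore.code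
  have hdf := (show abiInv _ from hcore.abi).1
  have hmx := (show abiInv _ from hcore.abi).2
  have hsse := ProgX.Base.sseOK_of_abiInv hcore.abi
  have k_r15 : v.mem.readLE (e.reg .rsp - 8) 8 = (e.reg .r15).toNat := hcore.slot_r15
  have k_r14 : v.mem.readLE (e.reg .rsp - 16) 8 = (e.reg .r14).toNat := hcore.slot_r14
  have k_r13 : v.mem.readLE (e.reg .rsp - 24) 8 = (e.reg .r13).toNat := hcore.slot_r13
  have k_r12 : v.mem.readLE (e.reg .rsp - 32) 8 = (e.reg .r12).toNat := hcore.slot_r12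
  have k_rbp : v.mem.readLE (e.reg .rsp - 40) 8 = (e.reg .rbp).toNat := hcore.slot_rbp
  have k_rbx : v.mem.readLE (e.reg .rsp - 48) 8 = (e.reg .rbx).toNat := hcore.slot_rbx
  have k_ra : UInt64.ofNat (v.mem.readLE (e.reg .rsp) 8) = ret := hcore.slot_ra
  have hsame : Mem.SameExcept
    [⟨(e.reg .rsp).toNat - 528, (e.reg .rsp).toNat⟩,
     shadowSpan ((e.reg .rsp).toNat - 120) ((e.reg .rsp).toNat - 56),
     ⟨0x800000, 0x1000020⟩,
     ⟨(e.reg .rdx).toNat, (e.reg .rdx).toNat + 4⟩,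
     ⟨R.cur, R.cur + 8⟩] e.mem v.mem := hcore.same
  have hcur := hctx.cursor_range hpre.inv.shadow
  have hbaseC : Hc.base = 0x800000 := hregion.1.trans hpre.base
  u_walk hcode [hμ.vendor] until [Gif.L.DGifOpen.at_1087b9, o3_at_108882] span [ProgX.Base.L.textLo, ProgX.Base.L.textHi] side (v_side)
  case check_108875 =>
    -- dgif_lib.c:209 the store `*Error = D_GIF_ERR_READ_FAILED`: 4 bytes of a stack object of a caller's frame
    have hun : ShadowUntouched v.mem s_108875.mem := by v_untouched
    have hl : LiveIn (Hc.liveObjs ++ rest) (DGifOpen.framesIn frames e) (e.reg .rdx).toNat 4 :=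
      DGifOpen.errLive herr hbr_108870 hpre.inv Hc _
    exact hl.accSmall hinv.shadow hun _ 4 (by decide) (by u_omega) (by u_omega)
  case side_code =>
    have hrange := o3_err_range herr hbr_108870 hpre.inv
    omega
  · -- 0x108882 FROM 0x108870: `Error == NULL`, nothing stored
    refine ReachVia.done (Or.inr ?_)
    refine o3_opened_move hat0 w_rip w_mem w_rsp (w_kept.get .r12 rfl) (w_kept.get .r13 rfl) (w_kept.get .rbx rfl)
      (w_kept.get .rbp rfl) ?_
    refine ProgX.Base.abiInv_of ?_ ?_
    · rw [w_flags]
      simp only [X86.User.df_setStatus]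
      exact hdf
    · rw [w_mxcsr]
      exact hmx
  · -- 0x108882 FROM 0x10887a: `*Error = 102` stored
    have hrange := o3_err_range herr hbr_108870 hpre.inv
    -- the two stores since `v`: the check call's return address (stack), then `*Error`
    obtain ⟨hinvA, hokA, hremA⟩ := store_stack hinv hok ⟨hcur.1, hcur.2.1⟩ (e.reg .rsp - 128) 8 1083514
      (by u_omega) (by u_omega)
    obtain ⟨hinvB, hokB, hremB⟩ := o3_store_err herr hbr_108870 hinvA hokA ⟨hcur.1, hcur.2.1⟩ hbaseC (e.reg .rdx) 102 rfl
    rw [← w_mem] at hinvB hokB hremB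
    have hremF : rem R s_10887a.mem = rem R v.mem := hremB.trans hremA
    refine ReachVia.done (Or.inr ?_)
    exact {
      core := {
        entry := hcore.entry
        pre := hcore.pre
        rip := w_rip
        rsp := w_rsp
        r12 := (w_kept.get .r12 rfl).trans hcore.r12
        slot_r15 := by
          rw [w_mem]
          u_frame k_r15
        slot_r14 := by
          rw [w_mem]
          u_frame k_r14
        slot_r13 := by
          rw [w_mem]
          u_frame k_r13
        slot_r12 := by
          rw [w_mem]
          u_frame k_r12
        slot_rbp := by
          rw [w_mem]
          u_frame k_rbp
        slot_rbx := by
          rw [w_mem]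
          u_frame k_rbx
        slot_ra := by
          rw [w_mem]
          u_frame k_ra
        rem := by
          rw [hremF]
          exact hcore.rem
        same := by
          rw [w_mem]
          u_same
        code := ProgX.Base.conv_code_in w_eq
        abi := by
          refine ProgX.Base.abiInv_of ?_ ?_
          · rw [w_flags]
            exact w_df_108875
          · rw [w_mxcsr]
            exact hmx
      }
      r13 := (w_kept.get .r13 rfl).trans c_r13
      rbx := by
        rw [w_kept.get .rbx rfl]
        exact hrbx
      rbp := by
        rw [w_kept.get .rbp rfl]
        exact hrbp
      region := hregion
      inv := hinvB
      ok := hokB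
    }
  · -- 0x1087b9: six bytes were read
    refine ReachVia.done (Or.inl ?_)
    refine o3_opened_move hat0 w_rip w_mem w_rsp (w_kept.get .r12 rfl) (w_kept.get .r13 rfl) (w_kept.get .rbx rfl)
      (w_kept.get .rbp rfl) ?_
    refine ProgX.Base.abiInv_of ?_ ?_
    · rw [w_flags]
      simp only [X86.User.df_setStatus]
      exact hdf
    · rw [w_mxcsr]
      exact hmx

/-- **The cursor, the constants and the reader's measure through a call of `free(p)`** made from the body: its footprint (stack
below the cursor, the state word of the header of `p`, the shadow of the object) misses the cursor and the constants. -/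
theorem o3_after_free {R : Rd} {mem mem' : Mem} {lo top p n : Nat}
    (hs : Mem.SameExcept [⟨lo, top⟩, ⟨p - 24, p - 16⟩, ⟨0xC00000 + p / 8, 0xC00000 + (p + n + 7) / 8⟩] mem mem')
    (hcur : 0x700000 ≤ R.cur ∧ R.cur + 16 ≤ 0x800000) (htop : top ≤ R.cur) (hlo : 0x700000 ≤ lo) (hp : 0x800040 ≤ p)
    (hc : CursorOK R mem) (hk : Consts mem) : CursorOK R mem' ∧ Consts mem' ∧ rem R mem' = rem R mem := by
  have hoff : ∀ w, w ∈ [(⟨lo, top⟩ : Span), ⟨p - 24, p - 16⟩, ⟨0xC00000 + p / 8, 0xC00000 + (p + n + 7) / 8⟩] →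
      (w.hi ≤ R.cur ∨ R.cur + 16 ≤ w.lo) ∧ (w.hi ≤ 0x141300 ∨ 0x14139a ≤ w.lo) := by
    intro w hw
    simp only [List.mem_cons, List.not_mem_nil, or_false] at hw
    rcases hw with rfl | rfl | rfl
    · simp only
      omega
    · simp only
      omega
    · simp only
      omega
  refine ⟨hc.sameExcept hs (by omega) (fun w hw => (hoff w hw).1), hk.sameExcept hs (fun w hw => (hoff w hw).2), ?_⟩
  exact rem_sameExcept hs (by omega) (fun w hw => (hoff w hw).1)

/-- **At 10888AH (ret22), `free(Private)` has returned** (dgif_lib.c:211): `Core`; the heap is `Hc.release pv`, its invariant with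
the own frame active; `rbx = gif`, still live there; the cursor and the constants are as they were (what `Done` asks: there is no
forest any more). -/
structure o3_AtRet22 (H : Heap) (rest : List Obj) (frames : List (Nat × FrameLayout)) (R : Rd) (Hc : Heap) (gif pv : Nat)
    (u₀ e : State) (ret : Word) (v : State) : Prop where
  core : DGifOpen.Core Gif.L.DGifOpen.ret22 H rest frames R u₀ e ret v
  /-- `GifFile`: the argument of the second `free` -/
  rbx : (v.reg .rbx).toNat = gif
  region : SameRegion H Hc
  inv : HeapInv (Hc.release pv) rest (DGifOpen.framesIn frames e) ((e.reg .rsp).toNat - 120) v.mem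
  /-- gif is another object than pv: still live -/
  live : (Hc.release pv).Live gif 120
  cursor : CursorOK R v.mem
  consts : Consts v.mem

/-- **108882H … the call of `free(Private)` … 10888AH (ret22)** (dgif_lib.c:211). -/
theorem o3_seg_free1 (Lay : Layout) (hLay : Lay.hi = 0x1000000) (μ : Microarch) (hμ : UserX.MicroOK μ) (u₀ : State)
    (hcode : HasCodeNat Lay u₀ Gif.L.DGifOpen.entry Gif.Code.code_DGifOpen.nat Gif.L.DGifOpen.size)
    (H : Heap) (rest : List Obj) (frames : List (Nat × FrameLayout)) (R : Rd) (Hc : Heap) (gif pv : Nat) (e : State) (ret : Word)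
    (h_free : Calls Lay μ ProgX.Base.WayInv (ProgX.Base.conv u₀) ProgX.Base.L.free.entry
      (ProgX.Base.Spec.free.spec Hc rest (DGifOpen.framesIn frames e) 24936))
    (v : State) (hat : DGifOpen.Opened o3_at_108882 H rest frames R Hc gif pv u₀ e ret v) :
    ReachVia Lay μ ProgX.Base.WayInv v (o3_AtRet22 H rest frames R Hc gif pv u₀ e ret) := by
  obtain ⟨hcore, c_r13, hrbx, hrbp, hregion, hinv, hok⟩ := hat
  have he := hcore.entry
  v_entry he
  obtain ⟨hpre, hctx, hcursor, hconsts, hrdi, hrsi, herr⟩ := hcore.pre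
  have w_rip := hcore.rip
  have c_rsp : v.reg .rsp = e.reg .rsp - 120 := hcore.rsp
  have w_kept : RegsKept [.rsp] v v := RegsKept.refl _ _
  have w_eq : Mem.EqOn ProgX.Base.L.textLo ProgX.Base.L.textHi u₀.mem v.mem := ProgX.Base.conv_code_eqOn hcore.code
  have hdf := (show abiInv _ from hcore.abi).1
  have hmx := (show abiInv _ from hcore.abi).2
  have hsse := ProgX.Base.sseOK_of_abiInv hcore.abi
  have k_r15 : v.mem.readLE (e.reg .rsp - 8) 8 = (e.reg .r15).toNat := hcore.slot_r15
  have k_r14 : v.mem.readLE (e.reg .rsp - 16) 8 = (e.reg .r14).toNat := hcore.slot_r14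
  have k_r13 : v.mem.readLE (e.reg .rsp - 24) 8 = (e.reg .r13).toNat := hcore.slot_r13
  have k_r12 : v.mem.readLE (e.reg .rsp - 32) 8 = (e.reg .r12).toNat := hcore.slot_r12
  have k_rbp : v.mem.readLE (e.reg .rsp - 40) 8 = (e.reg .rbp).toNat := hcore.slot_rbp
  have k_rbx : v.mem.readLE (e.reg .rsp - 48) 8 = (e.reg .rbx).toNat := hcore.slot_rbx
  have k_ra : UInt64.ofNat (v.mem.readLE (e.reg .rsp) 8) = ret := hcore.slot_ra
  have hsame : Mem.SameExcept
    [⟨(e.reg .rsp).toNat - 528, (e.reg .rsp).toNat⟩,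
     shadowSpan ((e.reg .rsp).toNat - 120) ((e.reg .rsp).toNat - 56),
     ⟨0x800000, 0x1000020⟩,
     ⟨(e.reg .rdx).toNat, (e.reg .rdx).toNat + 4⟩,
     ⟨R.cur, R.cur + 8⟩] e.mem v.mem := hcore.same
  have hcur := hctx.cursor_range hpre.inv.shadow
  have hbaseC : Hc.base = 0x800000 := hregion.1.trans hpre.base
  have hlimitC : Hc.limit = 0xC00000 := hregion.2.trans hpre.limit
  -- where pv is, as numbers
  have hpin := hok.owns.inside hinv.heap (o := (pv, 24936)) (List.mem_cons_of_mem _ List.mem_cons_self)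
  have hp1 : 0x800040 ≤ pv := by
    have h1 := hpin.1
    simp only at h1
    omega
  have hp2 : pv + 24936 + 32 ≤ 0xC00000 := hpin.2.2.2.2
  clear hpin
  have hplive : Hc.Live pv 24936 := hok.pv_live
  u_walk hcode [hμ.vendor] until [Gif.L.DGifOpen.ret22] span [ProgX.Base.L.textLo, ProgX.Base.L.textHi] side (v_side)
  case call_inv =>
    v_inv
  case pre_108885 =>
    -- `free(Private)`: the heap's invariant over the pushed return address; pv is live
    have e_rsp : (s_108885.reg .rsp).toNat + 8 = (e.reg .rsp).toNat - 120 := by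
      rw [w_rsp]
      u_omega
    refine ⟨⟨?_, hbaseC, hlimitC, hpre.text, hpre.offText⟩, Or.inr ?_⟩
    · rw [e_rsp, w_mem]
      exact hinv.writeLE_out _ _ _ (by u_omega) (by rw [hbaseC]; left; u_omega) (by left; u_omega)
    · rw [w_rdi, hrbp]
      exact hplive
  -- 0x10888a (ret22): `free(Private)` has returned: the heap is `Hc.release pv`
  have hne1 : (s_108885.reg .rdi).toNat ≠ 0 := by
    rw [w_rdi_108885, hrbp]
    omega
  have hinv1 := w_post.2 hne1
  rw [w_rdi_108885, hrbp] at hinv1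
  clear w_post
  have e8 : (s_108885.reg .rsp).toNat + 8 = (e.reg .rsp).toNat - 120 := by
    rw [w_rsp_108885]
    u_omega
  rw [e8] at hinv1
  v_after_call w_rsp_108885 w_mem_108885
  simp only [shadowSpan, w_rdi_108885, hrbp] at w_same
  -- THE SLOTS AND THE RETURN ADDRESS, over the pushed return address (first step) and through `free`'s footprint (second)
  have hp_r15 : s_108885.mem.readLE (e.reg .rsp - 8) 8 = (e.reg .r15).toNat := by
    rw [w_mem_108885]
    u_frame k_r15
  rw [w_mem_108885] at hp_r15
  have hs_r15 : s_108885r.mem.readLE (e.reg .rsp - 8) 8 = (e.reg .r15).toNat := by u_frame hp_r15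
  have hp_r14 : s_108885.mem.readLE (e.reg .rsp - 16) 8 = (e.reg .r14).toNat := by
    rw [w_mem_108885]
    u_frame k_r14
  rw [w_mem_108885] at hp_r14
  have hs_r14 : s_108885r.mem.readLE (e.reg .rsp - 16) 8 = (e.reg .r14).toNat := by u_frame hp_r14
  have hp_r13 : s_108885.mem.readLE (e.reg .rsp - 24) 8 = (e.reg .r13).toNat := by
    rw [w_mem_108885]
    u_frame k_r13
  rw [w_mem_108885] at hp_r13
  have hs_r13 : s_108885r.mem.readLE (e.reg .rsp - 24) 8 = (e.reg .r13).toNat := by u_frame hp_r13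
  have hp_r12 : s_108885.mem.readLE (e.reg .rsp - 32) 8 = (e.reg .r12).toNat := by
    rw [w_mem_108885]
    u_frame k_r12
  rw [w_mem_108885] at hp_r12
  have hs_r12 : s_108885r.mem.readLE (e.reg .rsp - 32) 8 = (e.reg .r12).toNat := by u_frame hp_r12
  have hp_rbp : s_108885.mem.readLE (e.reg .rsp - 40) 8 = (e.reg .rbp).toNat := by
    rw [w_mem_108885]
    u_frame k_rbp
  rw [w_mem_108885] at hp_rbp
  have hs_rbp : s_108885r.mem.readLE (e.reg .rsp - 40) 8 = (e.reg .rbp).toNat := by u_frame hp_rbp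
  have hp_rbx : s_108885.mem.readLE (e.reg .rsp - 48) 8 = (e.reg .rbx).toNat := by
    rw [w_mem_108885]
    u_frame k_rbx
  rw [w_mem_108885] at hp_rbx
  have hs_rbx : s_108885r.mem.readLE (e.reg .rsp - 48) 8 = (e.reg .rbx).toNat := by u_frame hp_rbx
  have hp_ra : UInt64.ofNat (s_108885.mem.readLE (e.reg .rsp) 8) = ret := by
    rw [w_mem_108885]
    u_frame k_ra
  rw [w_mem_108885] at hp_ra
  have hs_ra : UInt64.ofNat (s_108885r.mem.readLE (e.reg .rsp) 8) = ret := by u_frame hp_ra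
  -- what was written since `v`: stack below the body's frame, the header's state word, the object's shadow
  have hsl : Mem.SameExcept [⟨(e.reg .rsp).toNat - 528, (e.reg .rsp).toNat - 120⟩, ⟨pv - 24, pv - 16⟩,
      ⟨0xC00000 + pv / 8, 0xC00000 + (pv + 24936 + 7) / 8⟩] v.mem s_108885r.mem := by u_same
  obtain ⟨hcursor1, hconsts1, hrem1⟩ := o3_after_free hsl ⟨hcur.1, hcur.2.1⟩ (by omega) (by omega) hp1
    hok.shape.cursor hok.shape.consts
  -- the footprint since the entry: `free`'s windows lie inside the heap's region and its shadow
  have hsame1 : Mem.SameExcept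
    [⟨(e.reg .rsp).toNat - 528, (e.reg .rsp).toNat⟩,
     shadowSpan ((e.reg .rsp).toNat - 120) ((e.reg .rsp).toNat - 56),
     ⟨0x800000, 0x1000020⟩,
     ⟨(e.reg .rdx).toNat, (e.reg .rdx).toNat + 4⟩,
     ⟨R.cur, R.cur + 8⟩] e.mem s_108885r.mem := by u_same
  refine ReachVia.done ?_
  exact {
    core := {
      entry := hcore.entry
      pre := hcore.pre
      rip := w_rip
      rsp := w_rsp
      r12 := (w_kept.get .r12 rfl).trans hcore.r12
      slot_r15 := hs_r15
      slot_r14 := hs_r14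
      slot_r13 := hs_r13
      slot_r12 := hs_r12
      slot_rbp := hs_rbp
      slot_rbx := hs_rbx
      slot_ra := hs_ra
      rem := by
        rw [hrem1]
        exact hcore.rem
      same := hsame1
      code := w_code
      abi := w_inv
    }
    rbx := by
      rw [w_kept.get .rbx rfl]
      exact hrbx
    region := hregion
    inv := hinv1
    live := hok.gif_live.release_ne hok.gif_ne_pv
    cursor := hcursor1
    consts := hconsts1
  }

/-- **10888AH (ret22) … the call of `free(GifFile)` … 108892H (ret23) … 108816H** (dgif_lib.c:212-213): gif is freed in the heap
`Hc.release pv`, `ebx = 0` (the result NULL), and on to the epilogue with the heap `(Hc.release pv).release gif`. -/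
theorem o3_seg_free2 (Lay : Layout) (hLay : Lay.hi = 0x1000000) (μ : Microarch) (hμ : UserX.MicroOK μ) (u₀ : State)
    (hcode : HasCodeNat Lay u₀ Gif.L.DGifOpen.entry Gif.Code.code_DGifOpen.nat Gif.L.DGifOpen.size)
    (H : Heap) (rest : List Obj) (frames : List (Nat × FrameLayout)) (R : Rd) (Hc : Heap) (gif pv : Nat) (e : State) (ret : Word)
    (h_free : Calls Lay μ ProgX.Base.WayInv (ProgX.Base.conv u₀) ProgX.Base.L.free.entry
      (ProgX.Base.Spec.free.spec (Hc.release pv) rest (DGifOpen.framesIn frames e) 120))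
    (v : State) (hat : o3_AtRet22 H rest frames R Hc gif pv u₀ e ret v) :
    ReachVia Lay μ ProgX.Base.WayInv v (DGifOpen.Exit H rest frames R u₀ e ret) := by
  obtain ⟨hcore, hrbx, hregion, hinv, hglive, hcursor0, hconsts0⟩ := hat
  have he := hcore.entry
  v_entry he
  obtain ⟨hpre, hctx, hcursor, hconsts, hrdi, hrsi, herr⟩ := hcore.pre
  have w_rip := hcore.rip
  have c_rsp : v.reg .rsp = e.reg .rsp - 120 := hcore.rsp
  have w_kept : RegsKept [.rsp] v v := RegsKept.refl _ _
  have w_eq : Mem.EqOn ProgX.Base.L.textLo ProgX.Base.L.textHi u₀.mem v.mem := ProgX.Base.conv_code_eqOn hcore.code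
  have hdf := (show abiInv _ from hcore.abi).1
  have hmx := (show abiInv _ from hcore.abi).2
  have hsse := ProgX.Base.sseOK_of_abiInv hcore.abi
  have k_r15 : v.mem.readLE (e.reg .rsp - 8) 8 = (e.reg .r15).toNat := hcore.slot_r15
  have k_r14 : v.mem.readLE (e.reg .rsp - 16) 8 = (e.reg .r14).toNat := hcore.slot_r14
  have k_r13 : v.mem.readLE (e.reg .rsp - 24) 8 = (e.reg .r13).toNat := hcore.slot_r13
  have k_r12 : v.mem.readLE (e.reg .rsp - 32) 8 = (e.reg .r12).toNat := hcore.slot_r12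
  have k_rbp : v.mem.readLE (e.reg .rsp - 40) 8 = (e.reg .rbp).toNat := hcore.slot_rbp
  have k_rbx : v.mem.readLE (e.reg .rsp - 48) 8 = (e.reg .rbx).toNat := hcore.slot_rbx
  have k_ra : UInt64.ofNat (v.mem.readLE (e.reg .rsp) 8) = ret := hcore.slot_ra
  have hsame : Mem.SameExcept
    [⟨(e.reg .rsp).toNat - 528, (e.reg .rsp).toNat⟩,
     shadowSpan ((e.reg .rsp).toNat - 120) ((e.reg .rsp).toNat - 56),
     ⟨0x800000, 0x1000020⟩,
     ⟨(e.reg .rdx).toNat, (e.reg .rdx).toNat + 4⟩,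
     ⟨R.cur, R.cur + 8⟩] e.mem v.mem := hcore.same
  have hcur := hctx.cursor_range hpre.inv.shadow
  have hbaseC : (Hc.release pv).base = 0x800000 := hregion.1.trans hpre.base
  have hlimitC : (Hc.release pv).limit = 0xC00000 := hregion.2.trans hpre.limit
  -- where gif is, as numbers
  obtain ⟨gcap, hgcap⟩ := hglive
  have hgrg := hinv.heap.obj_range hgcap
  have hgin := hinv.heap.obj_inside hgcap
  have hglive : (Hc.release pv).Live gif 120 := ⟨gcap, hgcap⟩
  rw [hbaseC] at hgrg
  simp only at hgrg hgin
  have hg1 : 0x800040 ≤ gif := hgrg.1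
  have hg2 : gif + 120 + 32 ≤ 0xC00000 := hgin.2.2.1
  clear hgrg hgin hgcap
  u_walk hcode [hμ.vendor] until [Gif.L.DGifOpen.ret23] span [ProgX.Base.L.textLo, ProgX.Base.L.textHi] side (v_side)
  case call_inv =>
    v_inv
  case pre_10888d =>
    -- `free(GifFile)`: the heap's invariant over the pushed return address; gif is still live
    have e_rsp : (s_10888d.reg .rsp).toNat + 8 = (e.reg .rsp).toNat - 120 := by
      rw [w_rsp]
      u_omega
    refine ⟨⟨?_, hbaseC, hlimitC, hpre.text, hpre.offText⟩, Or.inr ?_⟩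
    · rw [e_rsp, w_mem]
      exact hinv.writeLE_out _ _ _ (by u_omega) (by rw [hbaseC]; left; u_omega) (by left; u_omega)
    · rw [w_rdi, hrbx]
      exact hglive
  -- 0x108892 (ret23): `free(GifFile)` has returned: the heap is `(Hc.release pv).release gif`
  have hne1 : (s_10888d.reg .rdi).toNat ≠ 0 := by
    rw [w_rdi_10888d, hrbx]
    omega
  have hinv1 := w_post.2 hne1
  rw [w_rdi_10888d, hrbx] at hinv1
  clear w_post
  have e8 : (s_10888d.reg .rsp).toNat + 8 = (e.reg .rsp).toNat - 120 := by
    rw [w_rsp_10888d]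
    u_omega
  rw [e8] at hinv1
  v_after_call w_rsp_10888d w_mem_10888d
  simp only [shadowSpan, w_rdi_10888d, hrbx] at w_same
  -- THE SLOTS AND THE RETURN ADDRESS, over the pushed return address (first step) and through `free`'s footprint (second)
  have hp_r15 : s_10888d.mem.readLE (e.reg .rsp - 8) 8 = (e.reg .r15).toNat := by
    rw [w_mem_10888d]
    u_frame k_r15
  rw [w_mem_10888d] at hp_r15
  have hs_r15 : s_10888dr.mem.readLE (e.reg .rsp - 8) 8 = (e.reg .r15).toNat := by u_frame hp_r15
  have hp_r14 : s_10888d.mem.readLE (e.reg .rsp - 16) 8 = (e.reg .r14).toNat := by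
    rw [w_mem_10888d]
    u_frame k_r14
  rw [w_mem_10888d] at hp_r14
  have hs_r14 : s_10888dr.mem.readLE (e.reg .rsp - 16) 8 = (e.reg .r14).toNat := by u_frame hp_r14
  have hp_r13 : s_10888d.mem.readLE (e.reg .rsp - 24) 8 = (e.reg .r13).toNat := by
    rw [w_mem_10888d]
    u_frame k_r13
  rw [w_mem_10888d] at hp_r13
  have hs_r13 : s_10888dr.mem.readLE (e.reg .rsp - 24) 8 = (e.reg .r13).toNat := by u_frame hp_r13
  have hp_r12 : s_10888d.mem.readLE (e.reg .rsp - 32) 8 = (e.reg .r12).toNat := by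
    rw [w_mem_10888d]
    u_frame k_r12
  rw [w_mem_10888d] at hp_r12
  have hs_r12 : s_10888dr.mem.readLE (e.reg .rsp - 32) 8 = (e.reg .r12).toNat := by u_frame hp_r12
  have hp_rbp : s_10888d.mem.readLE (e.reg .rsp - 40) 8 = (e.reg .rbp).toNat := by
    rw [w_mem_10888d]
    u_frame k_rbp
  rw [w_mem_10888d] at hp_rbp
  have hs_rbp : s_10888dr.mem.readLE (e.reg .rsp - 40) 8 = (e.reg .rbp).toNat := by u_frame hp_rbp
  have hp_rbx : s_10888d.mem.readLE (e.reg .rsp - 48) 8 = (e.reg .rbx).toNat := by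
    rw [w_mem_10888d]
    u_frame k_rbx
  rw [w_mem_10888d] at hp_rbx
  have hs_rbx : s_10888dr.mem.readLE (e.reg .rsp - 48) 8 = (e.reg .rbx).toNat := by u_frame hp_rbx
  have hp_ra : UInt64.ofNat (s_10888d.mem.readLE (e.reg .rsp) 8) = ret := by
    rw [w_mem_10888d]
    u_frame k_ra
  rw [w_mem_10888d] at hp_ra
  have hs_ra : UInt64.ofNat (s_10888dr.mem.readLE (e.reg .rsp) 8) = ret := by u_frame hp_ra
  -- what was written since `v`: stack below the body's frame, the header's state word, the object's shadow
  have hsl : Mem.SameExcept [⟨(e.reg .rsp).toNat - 528, (e.reg .rsp).toNat - 120⟩, ⟨gif - 24, gif - 16⟩,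
      ⟨0xC00000 + gif / 8, 0xC00000 + (gif + 120 + 7) / 8⟩] v.mem s_10888dr.mem := by u_same
  obtain ⟨hcursor1, hconsts1, hrem1⟩ := o3_after_free hsl ⟨hcur.1, hcur.2.1⟩ (by omega) (by omega) hg1
    hcursor0 hconsts0
  -- the footprint since the entry: `free`'s windows lie inside the heap's region and its shadow
  have hsame1 : Mem.SameExcept
    [⟨(e.reg .rsp).toNat - 528, (e.reg .rsp).toNat⟩,
     shadowSpan ((e.reg .rsp).toNat - 120) ((e.reg .rsp).toNat - 56),
     ⟨0x800000, 0x1000020⟩,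
     ⟨(e.reg .rdx).toNat, (e.reg .rdx).toNat + 4⟩,
     ⟨R.cur, R.cur + 8⟩] e.mem s_10888dr.mem := by u_same
  clear hsl w_same hp_r15 hp_r14 hp_r13 hp_r12 hp_rbp hp_rbx hp_ra
  -- 0x108892 `mov ebx, 0 ; jmp 108816` (dgif_lib.c:213 `return NULL`)
  u_walk hcode [hμ.vendor] until [Gif.L.DGifOpen.at_108816] span [ProgX.Base.L.textLo, ProgX.Base.L.textHi] side (v_side)
  -- THE EXIT ASSERTION: `Done` at 0x108816, for the heap `(Hc.release pv).release gif`, with the result NULL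
  refine ReachVia.done ⟨(Hc.release pv).release gif, ?_⟩
  exact {
    core := {
      entry := hcore.entry
      pre := hcore.pre
      rip := w_rip
      rsp := w_rsp
      r12 := (w_kept.get .r12 rfl).trans hcore.r12
      slot_r15 := by
        rw [w_mem]
        exact hs_r15
      slot_r14 := by
        rw [w_mem]
        exact hs_r14
      slot_r13 := by
        rw [w_mem]
        exact hs_r13
      slot_r12 := by
        rw [w_mem]
        exact hs_r12
      slot_rbp := by
        rw [w_mem]
        exact hs_rbp
      slot_rbx := by
        rw [w_mem]
        exact hs_rbx
      slot_ra := by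
        rw [w_mem]
        exact hs_ra
      rem := by
        rw [w_mem, hrem1]
        exact hcore.rem
      same := by
        rw [w_mem]
        exact hsame1
      code := ProgX.Base.conv_code_in w_eq
      abi := by
        refine ProgX.Base.abiInv_of ?_ ?_
        · rw [w_flags]
          exact w_df
        · rw [w_mxcsr]
          exact w_mx
    }
    region := (hregion.trans (SameRegion.release Hc pv)).trans (SameRegion.release (Hc.release pv) gif)
    inv := by
      rw [w_mem]
      exact hinv1
    cursor := by
      rw [w_mem]
      exact hcursor1
    consts := by
      rw [w_mem]
      exact hconsts1
    res := by
      left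
      rw [w_rbx]
      decide
  }

end Gif.Spec.DGifOpen_3
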